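-- pv_equiv track=rewrite | github.com/MrHumanRebel/sze_python_programozas | mintavizsga/other/ListaElemekÖsszege.py | sum_nums
-- ===== SOURCE A (Python) =====
-- def sum_nums(list):
--     max_sum = 0
--     max_value = list[0]
--     for item in list:
--         maximum = sum([int(c) for c in str(item)])
--         if maximum > max_sum:
--             max_sum = maximum
--             max_value = item
--     return max_value
-- ===== SOURCE B (Python) =====
-- def sum_nums(list):
--     return sorted(list, key=lambda x: sum(int(c) for c in str(x)), reverse=True)[0]
-- ===== Notes on version B (the rewrite author's own statement) =====
-- stated objective: idiomatic
-- what changed: Replaces the manual running-max loop with a stable descending sort by digit sum followed by taking the first element (sort-then-select); the tie behaviour (first element with maximal digit sum) is preserved by sort stability.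
import Mathlib
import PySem

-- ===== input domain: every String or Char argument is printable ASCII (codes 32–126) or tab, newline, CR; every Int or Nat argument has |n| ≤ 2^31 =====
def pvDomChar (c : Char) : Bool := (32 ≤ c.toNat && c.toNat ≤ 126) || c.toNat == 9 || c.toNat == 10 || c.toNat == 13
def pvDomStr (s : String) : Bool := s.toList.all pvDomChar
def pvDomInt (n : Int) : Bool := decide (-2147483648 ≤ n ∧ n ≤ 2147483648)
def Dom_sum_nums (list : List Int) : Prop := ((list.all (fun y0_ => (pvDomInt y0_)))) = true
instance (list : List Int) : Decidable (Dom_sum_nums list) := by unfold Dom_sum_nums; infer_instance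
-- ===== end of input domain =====

-- B replaces A's hand-written running-max loop with a stable descending sort by digit sum and
-- taking the first element; ties still go to the first element with maximal digit sum.

-- shared helper: sum(int(c) for c in str(item))
def digitSum (item : Int) : Int :=
  ((PySem.Int.toChars item).map (fun c => (PySem.Int.ofChars? [c]).getD 0)).sum

-- ===== PORT A =====
def sum_nums (list : List Int) : Int :=
  (list.foldl
    (fun (s : Int × Int) item =>
      let maximum := digitSum item
      if s.1 < maximum then (maximum, item) else s)
    (0, PySem.List.pyGetD list 0 0)).2

-- ===== PORT B =====
def sum_nums_alt (list : List Int) : Int :=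
  PySem.List.pyGetD (PySem.List.sorted list digitSum true) 0 0

-- ===== PRECONDITION & SPEC =====
-- A raises IndexError on the empty list (list[0]) and ValueError on any negative element
-- (int('-') while summing the characters of str(item)); Pre_ excludes exactly those inputs.
def Pre_sum_nums (list : List Int) : Prop := list ≠ [] ∧ ∀ x ∈ list, 0 ≤ x
instance (list : List Int) : Decidable (Pre_sum_nums list) := by unfold Pre_sum_nums; infer_instance
def pvWitness_sum_nums : List Int := ([12, 9, 30])

def Spec_sum_nums (list : List Int) (out : Int) : Prop := out = sum_nums_alt list
instance (list : List Int) (out : Int) : Decidable (Spec_sum_nums list out) := by unfold Spec_sum_nums; infer_instance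

-- ===== CLAIM (what is proved, stated in full; the proofs are below) =====
def Claim_equal_sum_nums : Prop := ∀ (list : List Int), Dom_sum_nums list → Pre_sum_nums list → Spec_sum_nums list (sum_nums list)

-- ===== LEMMAS AND PROOFS =====

-- the ten decimal digit characters
def decDigits : List Char := ['0', '1', '2', '3', '4', '5', '6', '7', '8', '9']

theorem digitChar_mem_decDigits (n : Nat) (h : n < 10) : Nat.digitChar n ∈ decDigits := by
  interval_cases n <;> decide

theorem toDigitsCore_mem (f : Nat) : ∀ (n : Nat) (acc : List Char),
    (∀ c ∈ acc, c ∈ decDigits) → ∀ c ∈ Nat.toDigitsCore 10 f n acc, c ∈ decDigits := by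
  induction f with
  | zero => intro n acc hacc c hc; exact hacc c hc
  | succ f ih =>
    intro n acc hacc c hc
    simp only [Nat.toDigitsCore] at hc
    split at hc
    · rcases List.mem_cons.mp hc with h | h
      · exact h ▸ digitChar_mem_decDigits _ (Nat.mod_lt _ (by omega))
      · exact hacc c h
    · exact ih (n / 10) _ (by
        intro d hd
        rcases List.mem_cons.mp hd with h | h
        · exact h ▸ digitChar_mem_decDigits _ (Nat.mod_lt _ (by omega))
        · exact hacc d h) c hc

theorem digit_val_nonneg : ∀ c ∈ decDigits, (0 : Int) ≤ (PySem.Int.ofChars? [c]).getD 0 := by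
  intro c hc
  fin_cases hc <;> decide

theorem digitSum_nonneg (x : Int) (hx : 0 ≤ x) : 0 ≤ digitSum x := by
  unfold digitSum
  apply List.sum_nonneg
  intro v hv
  rcases List.mem_map.mp hv with ⟨c, hc, rfl⟩
  apply digit_val_nonneg
  have : PySem.Int.toChars x = Nat.toDigits 10 x.toNat := by
    simp [PySem.Int.toChars, not_lt.mpr hx]
  rw [this] at hc
  exact toDigitsCore_mem _ _ [] (by intro d hd; cases hd) c hc

-- head of an insertion step of the descending stable sort
theorem insertBy_head (x : Int) (acc : List Int) :
    (PySem.List.insertBy (fun a b => decide (digitSum b < digitSum a)) x acc).head? =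
      some (match acc.head? with
            | none => x
            | some m => if digitSum m < digitSum x then x else m) := by
  cases acc with
  | nil => rfl
  | cons m r =>
    by_cases h : digitSum m < digitSum x
    · simp [PySem.List.insertBy, h]
    · simp [PySem.List.insertBy, h]

-- head of the stable descending insertion sort is the first-maximizer fold
theorem sorted_head (t : List Int) : ∀ (acc : List Int) (m : Int), acc.head? = some m →
    ((t.foldl (fun acc x => PySem.List.insertBy (fun a b => decide (digitSum b < digitSum a)) x acc) acc).head?
      = some (t.foldl (fun m x => if digitSum m < digitSum x then x else m) m)) := by
  induction t with
  | nil => intro acc m h; simpa using h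
  | cons x t ih =>
    intro acc m h
    simp only [List.foldl_cons]
    apply ih
    rw [insertBy_head, h]

-- xs[0] of a list with a known head
theorem pyGetD_zero_of_head? (s : List Int) (v : Int) (h : s.head? = some v) :
    PySem.List.pyGetD s 0 0 = v := by
  cases s with
  | nil => simp at h
  | cons a r =>
    simp only [List.head?] at h
    injection h with h
    simp [PySem.List.pyGetD_zero_cons, h]

-- A's loop from a state (digitSum m, m) tracks the first-maximizer fold
theorem afold (t : List Int) : ∀ (m : Int),
    t.foldl (fun (s : Int × Int) item =>
        if s.1 < digitSum item then (digitSum item, item) else s) (digitSum m, m)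
      = (digitSum (t.foldl (fun m x => if digitSum m < digitSum x then x else m) m),
         t.foldl (fun m x => if digitSum m < digitSum x then x else m) m) := by
  induction t with
  | nil => intro m; rfl
  | cons x t ih =>
    intro m
    simp only [List.foldl_cons]
    by_cases h : digitSum m < digitSum x
    · rw [if_pos h, if_pos h]; exact ih x
    · rw [if_neg h, if_neg h]; exact ih m

-- ===== VERDICT (by name: the statement is the Claim_ definition above) =====
theorem sum_nums_spec : Claim_equal_sum_nums := by
  intro list _hdom hpre
  rcases hpre with ⟨hne, hnn⟩
  cases list with
  | nil => exact absurd rfl hne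
  | cons h t =>
    unfold Spec_sum_nums sum_nums sum_nums_alt
    rw [PySem.List.sorted_rev_eq_foldl_insertBy]
    have hh : (0 : Int) ≤ digitSum h := digitSum_nonneg h (hnn h (by simp))
    have hb := sorted_head t (PySem.List.insertBy (fun a b => decide (digitSum b < digitSum a)) h []) h rfl
    simp only [List.foldl_cons] at hb ⊢
    -- first iteration of A's loop
    have hfirst : (if (0 : Int) < digitSum h then (digitSum h, h) else (0, PySem.List.pyGetD (h :: t) 0 0))
        = (digitSum h, h) := by
      by_cases h0 : (0 : Int) < digitSum h
      · simp [h0]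
      · have : digitSum h = 0 := le_antisymm (not_lt.mp h0) hh
        simp [h0, this, PySem.List.pyGetD_zero_cons]
    rw [hfirst, afold, pyGetD_zero_of_head? _ _ hb]
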